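-- pv_equiv track=rewrite | github.com/maly-phy/multilingual-summarization-evaluation | src/utils.py | text_chunker
-- ===== SOURCE A (Python) =====
-- def text_chunker(text, chunk_size=20):
--     words = text.split()
--     all_chunks = []
--     for i in range(0, len(words), chunk_size):
--         chunk = " ".join(words[i : i + chunk_size])
--         all_chunks.append(chunk)
--     results = "\n\n".join(all_chunks)
--     return results
-- ===== SOURCE B (Python) =====
-- def text_chunker(text, chunk_size=20):
--     # One-pass streaming accumulator instead of range/slice indexing.
--     # A non-positive chunk_size is invalid for chunking: raise (A raises for 0,
--     # returns '' for negatives; both are outside this implementation's domain).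
--     if chunk_size < 1:
--         raise ValueError("chunk_size must be a positive integer")
--     chunks = []
--     buf = []
--     for w in text.split():
--         buf.append(w)
--         if len(buf) == chunk_size:
--             chunks.append(" ".join(buf))
--             buf = []
--     if buf:
--         chunks.append(" ".join(buf))
--     return "\n\n".join(chunks)
-- ===== Notes on version B (the rewrite author's own statement) =====
-- stated objective: alternative
-- what changed: replaces the range/slice chunking (index arithmetic plus a list slice per chunk) by a single streaming pass that fills a buffer word by word and flushes it at chunk_size; non-positive chunk_size is rejected with ValueError and lies outside Pre_
-- outside the precondition, e.g. on text_chunker('a b c', -2): A returns '', B raises ValueError; on text_chunker('a b', 0): A raises ValueError, B raises ValueError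
import Mathlib
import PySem

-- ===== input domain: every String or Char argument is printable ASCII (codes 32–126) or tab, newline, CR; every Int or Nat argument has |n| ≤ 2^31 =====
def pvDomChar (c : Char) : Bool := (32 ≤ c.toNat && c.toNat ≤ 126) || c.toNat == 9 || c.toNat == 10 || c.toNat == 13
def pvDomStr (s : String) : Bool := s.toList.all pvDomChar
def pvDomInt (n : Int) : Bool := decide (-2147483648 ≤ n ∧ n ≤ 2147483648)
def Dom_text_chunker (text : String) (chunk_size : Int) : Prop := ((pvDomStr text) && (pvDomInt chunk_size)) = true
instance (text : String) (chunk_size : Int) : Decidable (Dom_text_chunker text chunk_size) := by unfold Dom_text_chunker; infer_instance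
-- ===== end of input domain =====

-- B replaces A's range/slice chunking by a one-pass buffer accumulator (alternative decomposition,
-- same cost); chunk_size < 1, where one or both programs raise ValueError, is outside Pre_.


-- ===== PORT A =====
def text_chunker (text : String) (chunk_size : Int) : String :=
  let words := PySem.Str.split₀ text
  let all_chunks := (PySem.List.pyRange 0 (words.length : Int) chunk_size).foldl
    (fun acc i => acc ++ [PySem.Str.join " " (PySem.List.slice words (some i) (some (i + chunk_size)))]) []
  PySem.Str.join "\n\n" all_chunks

-- ===== PORT B =====
def tcStep (chunk_size : Int) (st : List String × List String) (w : String) : List String × List String :=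
  let buf := st.2 ++ [w]
  if (buf.length : Int) = chunk_size then (st.1 ++ [PySem.Str.join " " buf], []) else (st.1, buf)

def text_chunker_alt (text : String) (chunk_size : Int) : String :=
  if chunk_size < 1 then ""  -- Source B raises ValueError here; these inputs are outside Pre_
  else
    let st := (PySem.Str.split₀ text).foldl (tcStep chunk_size) ([], [])
    let chunks := if st.2 = [] then st.1 else st.1 ++ [PySem.Str.join " " st.2]
    PySem.Str.join "\n\n" chunks

-- ===== PRECONDITION & SPEC =====
-- Pre_ excludes chunk_size ≤ 0: A raises ValueError for chunk_size = 0, and on negative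
-- chunk_size B itself raises ValueError (invalid chunk size), so those inputs are excluded too.
def Pre_text_chunker (text : String) (chunk_size : Int) : Prop := 1 ≤ chunk_size
instance (text : String) (chunk_size : Int) : Decidable (Pre_text_chunker text chunk_size) := by unfold Pre_text_chunker; infer_instance
def pvWitness_text_chunker : String × Int := ("alpha beta gamma delta", 2)

def Spec_text_chunker (text : String) (chunk_size : Int) (out : String) : Prop := out = text_chunker_alt text chunk_size
instance (text : String) (chunk_size : Int) (out : String) : Decidable (Spec_text_chunker text chunk_size out) := by unfold Spec_text_chunker; infer_instance

-- ===== CLAIM (what is proved, stated in full; the proofs are below) =====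
def Claim_equal_text_chunker : Prop := ∀ (text : String) (chunk_size : Int), Dom_text_chunker text chunk_size → Pre_text_chunker text chunk_size → Spec_text_chunker text chunk_size (text_chunker text chunk_size)

-- ===== LEMMAS AND PROOFS =====

-- the common description of the result: words grouped into chunks of size km+1
def tcChunks (km : Nat) : List String → List String
  | [] => []
  | w :: ws => PySem.Str.join " " (w :: ws.take km) :: tcChunks km (ws.drop km)
  termination_by l => l.length
  decreasing_by simp only [List.length_drop, List.length_cons]; omega

lemma tcPyRange_nil_of_pos {s : Int} (a b : Int) (hs : 0 < s) (hab : b ≤ a) :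
    PySem.List.pyRange a b s = [] := by
  rw [PySem.List.pyRange_of_pos a b hs]
  simp [show ¬ a < b by omega]

lemma tcPyRange_cons_of_pos {s : Int} (a b : Int) (hs : 0 < s) (hab : a < b) :
    PySem.List.pyRange a b s = a :: PySem.List.pyRange (a + s) b s := by
  rw [PySem.List.pyRange_of_pos a b hs, PySem.List.pyRange_of_pos (a + s) b hs]
  by_cases h : a + s < b
  · have h1 : b - a + s - 1 = (b - (a + s) + s - 1) + 1 * s := by ring
    have hcount : ((b - a + s - 1) / s).toNat = ((b - (a + s) + s - 1) / s).toNat + 1 := by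
      rw [h1, Int.add_mul_ediv_right _ _ (by omega : s ≠ 0)]
      have h2 : 0 ≤ (b - (a + s) + s - 1) / s := Int.ediv_nonneg (by omega) (by omega)
      omega
    rw [if_pos hab, if_pos h, hcount, List.range_succ_eq_map]
    simp only [List.map_cons, List.map_map]
    congr 1
    · simp
    · apply List.map_congr_left
      intro k _
      simp [Function.comp]
      ring
  · have h1 : b - a + s - 1 = (b - a - 1) + 1 * s := by ring
    have hz : (b - a - 1) / s = 0 := Int.ediv_eq_zero_of_lt (by omega) (by omega)
    have hcount : ((b - a + s - 1) / s).toNat = 1 := by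
      rw [h1, Int.add_mul_ediv_right _ _ (by omega : s ≠ 0), hz]
      rfl
    rw [if_pos hab, if_neg h, hcount]
    simp

lemma tcPyRange_shift_of_pos {s : Int} (a b c : Int) (hs : 0 < s) :
    PySem.List.pyRange (a + c) (b + c) s = (PySem.List.pyRange a b s).map (· + c) := by
  rw [PySem.List.pyRange_of_pos _ _ hs, PySem.List.pyRange_of_pos a b hs]
  have h1 : b + c - (a + c) = b - a := by ring
  by_cases hab : a < b
  · rw [h1, if_pos (by omega : a + c < b + c), if_pos hab, List.map_map]
    apply List.map_congr_left
    intro k _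
    simp [Function.comp]
    ring
  · rw [if_neg (by omega : ¬ a + c < b + c), if_neg hab]
    simp

-- A's loop over range(0, len(ws), km+1) with slices computes tcChunks km ws
lemma tcA_loop (km : Nat) : ∀ (n : Nat) (ws : List String), ws.length ≤ n → ∀ (acc : List String),
    (PySem.List.pyRange 0 (ws.length : Int) ((km + 1 : Nat) : Int)).foldl
      (fun acc i => acc ++ [PySem.Str.join " " (PySem.List.slice ws (some i) (some (i + ((km + 1 : Nat) : Int))))]) acc
      = acc ++ tcChunks km ws := by
  have hk : (0 : Int) < ((km + 1 : Nat) : Int) := by exact_mod_cast Nat.succ_pos km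
  intro n
  induction n with
  | zero =>
    intro ws hw acc
    have hws : ws = [] := by cases ws <;> simp_all
    subst hws
    simp only [List.length_nil, Nat.cast_zero]
    rw [tcPyRange_nil_of_pos 0 0 hk le_rfl, List.foldl_nil, tcChunks.eq_1, List.append_nil]
  | succ n ih =>
    intro ws hw acc
    cases ws with
    | nil =>
      simp only [List.length_nil, Nat.cast_zero]
      rw [tcPyRange_nil_of_pos 0 0 hk le_rfl, List.foldl_nil, tcChunks.eq_1, List.append_nil]
    | cons w t =>
      have hlen : (0 : Int) < (((w :: t).length : Nat) : Int) := by
        simp only [List.length_cons]; push_cast; omega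
      rw [tcPyRange_cons_of_pos 0 _ hk hlen, List.foldl_cons]
      have h0 : acc ++ [PySem.Str.join " " (PySem.List.slice (w :: t) (some 0) (some (0 + ((km + 1 : Nat) : Int))))]
          = acc ++ [PySem.Str.join " " (w :: t.take km)] := by
        rw [zero_add, PySem.List.slice_zero_start, PySem.List.slice_to_natCast, List.take_succ_cons]
      rw [h0]
      by_cases hcase : km ≤ t.length
      · -- at least one full chunk fits; shift the rest of the range onto the dropped list
        have hrest : (((w :: t).length : Nat) : Int) = (((t.drop km).length : Nat) : Int) + ((km + 1 : Nat) : Int) := by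
          simp only [List.length_cons, List.length_drop]; push_cast; omega
        rw [hrest, show (0 : Int) + ((km + 1 : Nat) : Int) = 0 + ((km + 1 : Nat) : Int) from rfl,
            tcPyRange_shift_of_pos 0 (((t.drop km).length : Nat) : Int) ((km + 1 : Nat) : Int) hk,
            List.foldl_map]
        rw [PySem.List.foldl_congr_mem _ _
            (fun acc i => acc ++ [PySem.Str.join " " (PySem.List.slice (t.drop km) (some i) (some (i + ((km + 1 : Nat) : Int))))])
            _ ?_]
        · rw [ih (t.drop km) (by simp only [List.length_drop]; simp only [List.length_cons] at hw; omega) _,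
              tcChunks.eq_2]
          simp
        · intro acc i hi
          have hmem := (PySem.List.mem_pyRange_iff_of_pos hk i).mp hi
          obtain ⟨m, hm⟩ : ∃ m : Nat, i = (m : Int) := ⟨i.toNat, by omega⟩
          subst hm
          dsimp only
          have e1 : (m : Int) + ((km + 1 : Nat) : Int) = ((m + (km + 1) : Nat) : Int) := by push_cast; ring
          rw [PySem.List.slice_natCast_add (t.drop km) m (km + 1), e1,
              PySem.List.slice_natCast_add (w :: t) (m + (km + 1)) (km + 1)]
          have e3 : (w :: t).drop (m + (km + 1)) = (t.drop km).drop m := by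
            rw [List.drop_drop, show m + (km + 1) = (km + m) + 1 by omega, List.drop_succ_cons]
          rw [e3]
      · -- the final, short chunk: the rest of the range is empty
        have hnil : PySem.List.pyRange (0 + ((km + 1 : Nat) : Int)) (((w :: t).length : Nat) : Int) ((km + 1 : Nat) : Int) = [] := by
          apply tcPyRange_nil_of_pos _ _ hk
          simp only [List.length_cons]; push_cast; omega
        rw [hnil, List.foldl_nil, tcChunks.eq_2,
            List.take_of_length_le (by omega : t.length ≤ km),
            List.drop_eq_nil_of_le (by omega : t.length ≤ km), tcChunks.eq_1]

lemma tcChunks_full (km : Nat) (c : List String) (hc : c.length = km + 1) (rest : List String) :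
    tcChunks km (c ++ rest) = PySem.Str.join " " c :: tcChunks km rest := by
  cases c with
  | nil => simp at hc
  | cons x xt =>
    have hxt : xt.length = km := by simp at hc; omega
    rw [List.cons_append, tcChunks.eq_2, List.take_left' hxt, List.drop_left' hxt]

-- B's buffer loop, started with a partial buffer, computes tcChunks km (buf ++ ws)
lemma tcB_loop (km : Nat) : ∀ (ws chunks buf : List String), buf.length < km + 1 →
    (fun st : List String × List String =>
      PySem.Str.join "\n\n" (if st.2 = [] then st.1 else st.1 ++ [PySem.Str.join " " st.2]))
      (ws.foldl (tcStep ((km + 1 : Nat) : Int)) (chunks, buf))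
    = PySem.Str.join "\n\n" (chunks ++ tcChunks km (buf ++ ws)) := by
  intro ws
  induction ws with
  | nil =>
    intro chunks buf hb
    by_cases h : buf = []
    · subst h; simp [tcChunks.eq_1]
    · cases buf with
      | nil => exact absurd rfl h
      | cons b bt =>
        have hbt : bt.length ≤ km := by simp at hb; omega
        simp [tcChunks.eq_2, tcChunks.eq_1, List.take_of_length_le hbt, List.drop_eq_nil_of_le hbt]
  | cons w rest ih =>
    intro chunks buf hb
    rw [List.foldl_cons]
    by_cases h : (buf ++ [w]).length = km + 1
    · have hstep : tcStep ((km + 1 : Nat) : Int) (chunks, buf) w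
          = (chunks ++ [PySem.Str.join " " (buf ++ [w])], []) := by
        simp [tcStep, h]
      rw [hstep, ih _ [] (by simp)]
      rw [show buf ++ w :: rest = (buf ++ [w]) ++ rest by simp,
          tcChunks_full km (buf ++ [w]) h rest]
      simp
    · have hne : ¬ buf.length = km := by simp at h; omega
      have hstep : tcStep ((km + 1 : Nat) : Int) (chunks, buf) w = (chunks, buf ++ [w]) := by
        simp [tcStep, hne]
      rw [hstep, ih _ (buf ++ [w]) (by simp at h ⊢; omega)]
      simp

-- ===== VERDICT (by name: the statement is the Claim_ definition above) =====
theorem text_chunker_spec : Claim_equal_text_chunker := by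
  intro text chunk_size _ hpre
  unfold Pre_text_chunker at hpre
  obtain ⟨km, hk⟩ : ∃ km : Nat, chunk_size = ((km + 1 : Nat) : Int) :=
    ⟨(chunk_size - 1).toNat, by omega⟩
  subst hk
  unfold Spec_text_chunker text_chunker text_chunker_alt
  rw [if_neg (by push_cast; omega : ¬ ((km + 1 : Nat) : Int) < 1)]
  show PySem.Str.join "\n\n" _ = _
  rw [tcA_loop km (PySem.Str.split₀ text).length (PySem.Str.split₀ text) le_rfl []]
  have hB := tcB_loop km (PySem.Str.split₀ text) [] [] (by simp)
  simp only [List.nil_append] at hB ⊢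
  exact hB.symm
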